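-- pv_equiv track=rewrite | github.com/Br41nfck/Find-Comments | find_comments.py | find_comment_block_in_code
-- ===== SOURCE A (Python) =====
-- def find_comment_block_in_code(code_lines, comment_lines):
--     """
--     Ищет последовательность строк из comment_lines в code_lines (игнорируя отступы).
--     Возвращает список индексов строк кода, которые соответствуют блоку комментария.
--     """
--     indices = set()
--     if not comment_lines:
--         return indices
--     code_stripped = [line.strip() for line in code_lines]
--     comment_stripped = [line.strip() for line in comment_lines if line.strip()]
--     n = len(code_stripped)
--     m = len(comment_stripped)
--     for i in range(n - m + 1):
--         if code_stripped[i:i+m] == comment_stripped: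
--             indices.update(range(i, i+m))
--     return indices
-- ===== SOURCE B (Python) =====
-- def find_comment_block_in_code(code_lines, comment_lines):
--     """Index-driven search: build a hash map from stripped line to its positions,
--     then verify only the candidate starts where the first comment line occurs."""
--     if not comment_lines:
--         return set()
--     code = [l.strip() for l in code_lines]
--     pat = [s for s in (l.strip() for l in comment_lines) if s]
--     if not pat:
--         return set()
--     n = len(code)
--     m = len(pat)
--     pos = {}
--     for j, s in enumerate(code):
--         pos.setdefault(s, []).append(j)
--     covered = set()
--     for i in pos.get(pat[0], []):
--         if i + m <= n and all(code[i + j] == pat[j] for j in range(1, m)):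
--             covered.update(range(i, i + m))
--     return covered
-- ===== Notes on version B (the rewrite author's own statement) =====
-- stated objective: alternative
-- what changed: A compares the comment block against every window of the stripped code by slice equality; B builds a hash index from stripped line to its positions once and verifies only the candidate starts where the first comment line occurs, with a bound check and an element-wise scan of the rest of the window.
import Mathlib
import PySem

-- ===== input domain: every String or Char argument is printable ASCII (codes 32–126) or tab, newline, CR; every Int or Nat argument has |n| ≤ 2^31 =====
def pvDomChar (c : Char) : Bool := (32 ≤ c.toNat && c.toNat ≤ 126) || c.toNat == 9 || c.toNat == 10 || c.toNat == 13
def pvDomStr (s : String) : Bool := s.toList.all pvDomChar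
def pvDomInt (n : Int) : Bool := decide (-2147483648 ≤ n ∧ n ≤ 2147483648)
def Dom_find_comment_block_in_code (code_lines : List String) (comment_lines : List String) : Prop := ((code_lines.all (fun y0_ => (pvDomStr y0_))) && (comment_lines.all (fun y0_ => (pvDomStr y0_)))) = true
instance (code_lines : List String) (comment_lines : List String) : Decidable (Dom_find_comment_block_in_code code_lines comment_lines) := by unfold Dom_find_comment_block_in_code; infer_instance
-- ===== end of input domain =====

-- B replaces A's scan of every window (slice comparison at each start) by a hash index
-- from stripped line to its positions, verifying only candidate starts where the first
-- comment line occurs; return values are proved identical (objective: alternative).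

-- ===== PORT A =====
def find_comment_block_in_code (code_lines : List String) (comment_lines : List String) : List Int :=
  let indices : PySem.Set Int := PySem.Set.empty
  if comment_lines.isEmpty then indices else
    let code_stripped := code_lines.map (fun line => PySem.Str.strip line)
    let comment_stripped := (comment_lines.filter (fun line => !(PySem.Str.strip line == ""))).map (fun line => PySem.Str.strip line)
    let n : Int := code_stripped.length
    let m : Int := comment_stripped.length
    (PySem.List.pyRange 0 (n - m + 1)).foldl
      (fun acc i =>
        if PySem.List.slice code_stripped (some i) (some (i + m)) == comment_stripped then
          PySem.Set.update acc (PySem.List.pyRange i (i + m))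
        else acc)
      indices

-- ===== PORT B =====
def find_comment_block_in_code_alt (code_lines : List String) (comment_lines : List String) : List Int :=
  if comment_lines.isEmpty then PySem.Set.empty else
    let code := code_lines.map (fun line => PySem.Str.strip line)
    let pat := (comment_lines.map (fun line => PySem.Str.strip line)).filter (fun s => !(s == ""))
    if pat.isEmpty then PySem.Set.empty else
      let n : Int := code.length
      let m : Int := pat.length
      -- pos.setdefault(s, []).append(j): group positions by stripped line
      let pos := (PySem.List.enumerate code 0).foldl
        (fun d p => d.modify p.2 [] (fun v => v ++ [p.1])) PySem.Dict.empty
      -- verify each candidate start (the 'all' compares in-range elements; exact since the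
      -- bound i + m ≤ n guards the indexing, as in Source B's short-circuit 'and')
      (pos.getD (PySem.List.pyGetD pat 0 "") []).foldl
        (fun covered i =>
          if i + m ≤ n ∧ (PySem.List.pyRange 1 m).all
              (fun j => PySem.List.pyGet? code (i + j) == PySem.List.pyGet? pat j) = true then
            PySem.Set.update covered (PySem.List.pyRange i (i + m))
          else covered)
        PySem.Set.empty

-- ===== PRECONDITION & SPEC =====
def Spec_find_comment_block_in_code (code_lines : List String) (comment_lines : List String) (out : List Int) : Prop := out = find_comment_block_in_code_alt code_lines comment_lines
instance (code_lines : List String) (comment_lines : List String) (out : List Int) : Decidable (Spec_find_comment_block_in_code code_lines comment_lines out) := by unfold Spec_find_comment_block_in_code; infer_instance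

-- ===== CLAIM (what is proved, stated in full; the proofs are below) =====
def Claim_equal_find_comment_block_in_code : Prop := ∀ (code_lines : List String) (comment_lines : List String), Dom_find_comment_block_in_code code_lines comment_lines → Spec_find_comment_block_in_code code_lines comment_lines (find_comment_block_in_code code_lines comment_lines)

-- ===== LEMMAS AND PROOFS =====

lemma pv_pyRange_nil {a b : Int} (h : b ≤ a) : PySem.List.pyRange a b = [] := by
  simp [PySem.List.pyRange]; omega

-- filtering a range by a predicate that only holds below a cutoff ignores the tail
lemma pv_filter_range_shrink (p : Nat → Bool) {a b : Nat} (h : a ≤ b)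
    (hp : ∀ k, p k = true → k < a) :
    (List.range b).filter p = (List.range a).filter p := by
  induction b with
  | zero => have ha : a = 0 := by omega
            subst ha; rfl
  | succ n ih =>
    rcases Nat.lt_or_ge n a with h1 | h1
    · have ha : a = n + 1 := by omega
      subst ha; rfl
    · have hpn : p n = false := by
        cases hpn : p n with
        | false => rfl
        | true => exact absurd (hp n hpn) (by omega)
      rw [List.range_succ, List.filter_append, ih h1]
      simp [hpn]

-- reading back the swapped pairs is reading the first components
lemma pv_swap_bridge (hd : String) (l : List (Int × String)) :
    ((l.map Prod.swap).filter (fun p => p.1 == hd)).map (fun p => p.2)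
    = (l.filter (fun p => p.2 == hd)).map (fun p => p.1) := by
  rw [List.filter_map, List.map_map]
  rfl

-- the positions grouped from enumerate, read back at one key
lemma pv_enum_pos (hd : String) : ∀ (C : List String) (s : Int),
    ((PySem.List.enumerate C s).filter (fun p => p.2 == hd)).map (fun p => p.1)
    = ((List.range C.length).filter (fun j => C.getD j "" == hd)).map (fun j : Nat => s + (j : Int)) := by
  intro C
  induction C with
  | nil => intro s; simp [PySem.List.enumerate]
  | cons x xs ih =>
    intro s
    have he : PySem.List.enumerate (x :: xs) s = (s, x) :: PySem.List.enumerate xs (s + 1) := by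
      simp [PySem.List.enumerate]
    have hr : List.range (x :: xs).length = 0 :: (List.range xs.length).map Nat.succ := by
      simpa using (List.range_succ_eq_map (n := xs.length))
    have htail : List.filter (fun j => (x :: xs).getD j "" == hd) ((List.range xs.length).map Nat.succ)
        = (List.filter (fun j => xs.getD j "" == hd) (List.range xs.length)).map Nat.succ := by
      rw [List.filter_map]
      congr 1
    have hmapsucc : ∀ (L : List Nat),
        (L.map Nat.succ).map (fun j : Nat => s + (j : Int)) = L.map (fun j : Nat => (s + 1) + (j : Int)) := by
      intro L
      rw [List.map_map]
      apply List.map_congr_left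
      intro j _
      simp [Function.comp]
      ring
    rw [he, hr, List.filter_cons, List.filter_cons]
    by_cases hx : (x == hd) = true
    · simp only [hx, if_pos, List.getD_cons_zero, List.map_cons, htail, hmapsucc,
        ih (s + 1), Nat.cast_zero, add_zero]
    · simp only [List.getD_cons_zero, hx, Bool.false_eq_true, if_false, htail, hmapsucc, ih (s + 1)]

-- window equality at one start, phrased as A's slice test versus B's candidate test
lemma pv_point (C : List String) (hd : String) (tl : List String) (j : Nat) (hj : j < C.length) :
    (PySem.List.slice C (some (j : Int)) (some ((j : Int) + ((hd :: tl).length : Int))) == hd :: tl)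
    = (decide ((j : Int) + ((hd :: tl).length : Int) ≤ (C.length : Int) ∧
          ((PySem.List.pyRange 1 ((hd :: tl).length : Int)).all
            (fun t => PySem.List.pyGet? C ((j : Int) + t) == PySem.List.pyGet? (hd :: tl) t)) = true)
        && (C.getD j "" == hd)) := by
  have hM1 : (hd :: tl).length = tl.length + 1 := rfl
  have hcast : ((j : Int) + ((hd :: tl).length : Int)) = ((j + (hd :: tl).length : Nat) : Int) := by
    push_cast; ring
  have hslice : PySem.List.slice C (some (j : Int)) (some ((j : Int) + ((hd :: tl).length : Int)))
      = (C.drop j).take (hd :: tl).length := by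
    rw [hcast, PySem.List.slice_natCast]
    congr 1
    omega
  rw [hslice, Bool.eq_iff_iff]
  simp only [beq_iff_eq, Bool.and_eq_true, decide_eq_true_eq, List.all_eq_true]
  constructor
  · intro h
    have hlen : (hd :: tl).length ≤ C.length - j := by
      have hl := congrArg List.length h
      simp only [List.length_take, List.length_drop] at hl
      omega
    have hidx : ∀ u : Nat, u < (hd :: tl).length → C[j + u]? = (hd :: tl)[u]? := by
      intro u hu
      have hg := congrArg (fun l => l[u]?) h
      simp only at hg
      rw [List.getElem?_take_of_lt hu, List.getElem?_drop] at hg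
      exact hg
    refine ⟨⟨by omega, ?_⟩, ?_⟩
    · intro t ht
      rcases PySem.List.mem_pyRange_one.mp ht with ⟨ht1, ht2⟩
      have htu : t = ((t.toNat : Nat) : Int) := by omega
      have h1 : ((j : Int) + ((t.toNat : Nat) : Int)) = ((j + t.toNat : Nat) : Int) := by
        push_cast; ring
      rw [htu, h1, PySem.List.pyGet?_natCast, PySem.List.pyGet?_natCast,
        hidx t.toNat (by omega)]
    · have h0 : C[j]? = some hd := by simpa using hidx 0 (by omega)
      rw [List.getD_eq_getElem?_getD, h0]
      rfl
  · rintro ⟨⟨hb, hall⟩, hhd⟩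
    have hjM : j + (hd :: tl).length ≤ C.length := by omega
    apply List.ext_getElem?
    intro u
    by_cases hu : u < (hd :: tl).length
    · have hL : ((C.drop j).take (hd :: tl).length)[u]? = C[j + u]? := by
        rw [List.getElem?_take_of_lt hu, List.getElem?_drop]
      rw [hL]
      rcases Nat.eq_zero_or_pos u with h0 | hpos
      · subst h0
        rw [Nat.add_zero, List.getElem?_eq_getElem hj]
        rw [List.getD_eq_getElem C "" hj] at hhd
        simp [hhd]
      · have ha := hall ((u : Nat) : Int)
          (PySem.List.mem_pyRange_one.mpr ⟨by omega, by omega⟩)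
        have h1 : ((j : Int) + ((u : Nat) : Int)) = ((j + u : Nat) : Int) := by push_cast; ring
        rw [h1, PySem.List.pyGet?_natCast, PySem.List.pyGet?_natCast] at ha
        exact ha
    · rw [List.getElem?_eq_none (by simp only [List.length_take, List.length_drop]; omega),
        List.getElem?_eq_none (by omega)]

theorem find_comment_block_in_code_spec : Claim_equal_find_comment_block_in_code := by
  unfold Claim_equal_find_comment_block_in_code
  intro cl co _
  unfold Spec_find_comment_block_in_code find_comment_block_in_code find_comment_block_in_code_alt
  cases co with
  | nil => rfl
  | cons c0 cr =>
    simp only [List.isEmpty_cons, Bool.false_eq_true, if_false, List.filter_map, Function.comp_def]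
    set C := cl.map (fun line => PySem.Str.strip line) with hC
    set P := ((c0 :: cr).filter (fun line => !(PySem.Str.strip line == ""))).map
        (fun line => PySem.Str.strip line) with hP
    clear_value C P
    cases P with
    | nil =>
      simp only [List.isEmpty_nil, if_pos, List.length_nil, Nat.cast_zero, sub_zero]
      have h1 : ((C.length : Int)) + 1 = ((C.length + 1 : Nat) : Int) := by push_cast; ring
      rw [h1, PySem.List.pyRange_zero_natCast, List.foldl_map]
      rw [PySem.List.foldl_congr_mem _ _ (fun acc _ => acc) _ ?hbody, PySem.List.foldl_ignore]
      case hbody =>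
        intro acc k hk
        simp [PySem.Set.update]
    | cons hd tl =>
      simp only [List.isEmpty_cons, Bool.false_eq_true, if_false]
      have hfold : (PySem.List.enumerate C 0).foldl
            (fun d p => d.modify p.2 [] (fun v => v ++ [p.1])) PySem.Dict.empty
          = ((PySem.List.enumerate C 0).map Prod.swap).foldl
            (fun d p => d.modify p.1 [] (fun v => v ++ [p.2])) PySem.Dict.empty := by
        rw [List.foldl_map]
        rfl
      have hkey : PySem.List.pyGetD (hd :: tl) 0 "" = hd := by
        simp [PySem.List.pyGetD, PySem.List.pyGet?, PySem.List.pyIdx?]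
      rw [hkey, hfold, PySem.Dict.getD_foldl_modify_append, pv_swap_bridge, pv_enum_pos]
      simp only [PySem.Dict.getD_empty, List.nil_append, zero_add]
      by_cases hNM : (hd :: tl).length ≤ C.length
      · have hcast : ((C.length : Int)) - ((hd :: tl).length : Int) + 1
            = ((C.length - (hd :: tl).length + 1 : Nat) : Int) := by omega
        rw [hcast, PySem.List.pyRange_zero_natCast, List.foldl_map, List.foldl_map]
        rw [PySem.List.foldl_if_eq_foldl_filter
              (p := fun k : Nat => PySem.List.slice C (some (k : Int))
                (some ((k : Int) + ((hd :: tl).length : Int))) == hd :: tl)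
              (f := fun acc (k : Nat) => PySem.Set.update acc
                (PySem.List.pyRange (k : Int) ((k : Int) + ((hd :: tl).length : Int))))]
        rw [PySem.List.foldl_ite_eq_foldl_filter
              (p := fun j : Nat => (j : Int) + ((hd :: tl).length : Int) ≤ (C.length : Int) ∧
                ((PySem.List.pyRange 1 ((hd :: tl).length : Int)).all
                  (fun t => PySem.List.pyGet? C ((j : Int) + t) == PySem.List.pyGet? (hd :: tl) t)) = true)
              (f := fun acc (j : Nat) => PySem.Set.update acc
                (PySem.List.pyRange (j : Int) ((j : Int) + ((hd :: tl).length : Int))))]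
        congr 1
        rw [List.filter_filter]
        have hM1 : (hd :: tl).length = tl.length + 1 := rfl
        have hshrink := pv_filter_range_shrink
            (fun j : Nat => decide ((j : Int) + ((hd :: tl).length : Int) ≤ (C.length : Int) ∧
                ((PySem.List.pyRange 1 ((hd :: tl).length : Int)).all
                  (fun t => PySem.List.pyGet? C ((j : Int) + t) == PySem.List.pyGet? (hd :: tl) t)) = true)
              && (C.getD j "" == hd))
            (a := C.length - (hd :: tl).length + 1) (b := C.length) (by omega) ?hcut
        case hcut =>
          intro k hk
          simp only [Bool.and_eq_true, decide_eq_true_eq] at hk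
          have h1 := hk.1.1
          omega
        rw [hshrink]
        apply List.filter_congr
        intro j hj
        have hjK : j < C.length := by
          have := List.mem_range.mp hj
          omega
        exact pv_point C hd tl j hjK
      · have hM1 : (hd :: tl).length = tl.length + 1 := rfl
        have hnil : PySem.List.pyRange 0 ((C.length : Int) - ((hd :: tl).length : Int) + 1) = [] := by
          apply pv_pyRange_nil
          omega
        rw [hnil, List.foldl_nil]
        rw [PySem.List.foldl_congr_mem _ _ (fun acc _ => acc) _ ?hbody2, PySem.List.foldl_ignore]
        case hbody2 =>
          intro acc i hi
          rcases List.mem_map.mp hi with ⟨j, hjmem, rfl⟩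
          rw [if_neg (by rintro ⟨hb, -⟩; omega)]
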